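-- pv_equiv track=rewrite | github.com/ebordenave/intro-to-python-course-material | 02_functions/def_nestedRemoval.py | nestedRemoval
-- ===== SOURCE A (Python) =====
-- def nestedRemoval(text: str, leftPattern: str, rightPattern: str) -> str:
--     # List to store indices to be removed
--     removed_list = []
--     # Temporarily store indices
--     temp_list = []
--     for i in range(len(text)):
--         s = text[i]
--         if s is leftPattern:
--             temp_list.append(i)
--         elif s is rightPattern:
--             if len(temp_list) > 0 and text[temp_list[-1]] is leftPattern:
--                 removed_list.append(temp_list[-1])
--                 removed_list.append(i)
--                 temp_list = temp_list[:-1]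
--             else:
--                 temp_list.append(i)
--     ans = ''
--     for i in range(len(text)):
--         if i not in removed_list:
--             ans = ans + text[i]
--
--     return ans
-- ===== SOURCE B (Python) =====
-- def nestedRemoval(text: str, leftPattern: str, rightPattern: str) -> str:
--     # Counting method: no stack and no pair bookkeeping.  A right delimiter is
--     # dropped iff the running count of still-open lefts before it is positive
--     # (forward pass); a left delimiter is dropped iff the running count of
--     # still-open rights after it is positive (backward pass).  These are
--     # exactly the delimiters removed by nearest-pair cancellation.
--     open_left = 0
--     keep_fwd = []
--     for c in text:
--         if c is leftPattern:
--             open_left += 1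
--             keep_fwd.append(True)
--         elif c is rightPattern and open_left > 0:
--             open_left -= 1
--             keep_fwd.append(False)
--         else:
--             keep_fwd.append(True)
--     open_right = 0
--     keep_bwd_rev = []
--     for c in reversed(text):
--         if c is leftPattern:
--             if open_right > 0:
--                 open_right -= 1
--                 keep_bwd_rev.append(False)
--             else:
--                 keep_bwd_rev.append(True)
--         else:
--             if c is rightPattern:
--                 open_right += 1
--             keep_bwd_rev.append(True)
--     keep_bwd = keep_bwd_rev[::-1]
--     return ''.join(c for c, kf, kb in zip(text, keep_fwd, keep_bwd) if kf and kb)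
-- ===== Notes on version B (the rewrite author's own statement) =====
-- stated objective: alternative
-- what changed: Replaced A's stack-matching pass (building a removed-index table) plus a rebuild pass scanning 'i not in removed_list' per character with two stackless counter passes: a forward pass drops each right delimiter seen while the count of open lefts is positive, a backward pass drops each left delimiter seen while the count of open rights is positive; no stack, no pair table, one final join.
import Mathlib
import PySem

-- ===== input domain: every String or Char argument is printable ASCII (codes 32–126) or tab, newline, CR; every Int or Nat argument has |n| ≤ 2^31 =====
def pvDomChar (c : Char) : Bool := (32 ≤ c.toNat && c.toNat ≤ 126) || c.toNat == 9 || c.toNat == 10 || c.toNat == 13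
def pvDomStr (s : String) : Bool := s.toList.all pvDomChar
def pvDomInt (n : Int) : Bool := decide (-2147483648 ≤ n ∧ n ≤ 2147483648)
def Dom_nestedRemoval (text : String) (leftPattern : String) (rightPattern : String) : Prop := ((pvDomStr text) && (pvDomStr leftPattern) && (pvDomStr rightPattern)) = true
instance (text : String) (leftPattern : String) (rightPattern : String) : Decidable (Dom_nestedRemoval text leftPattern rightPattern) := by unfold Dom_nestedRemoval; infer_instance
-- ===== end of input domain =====

-- B replaces A's stack-matching pass plus per-character 'i not in removed_list'
-- rebuild with two stackless counter passes (forward for rights, backward for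
-- lefts) and one join: a different algorithm of the same cost.
--
-- Python's `s is pat` for a 1-char ASCII `s` is True iff pat is that same
-- interned 1-char string (CPython interns all 1-char latin-1 strings), i.e.
-- iff pat has length 1 and equals s; both ports model it as `pat.toList == [c]`
-- (exact on Dom: all strings are ASCII).

-- ===== PORT A =====
def nrIsPat (pat : String) (c : Char) : Bool := pat.toList == [c]

-- one step of A's loop; state = (removed_list, temp_list), temp_list held
-- head-most-recent (Python appends/pops at the right end)
def nrStepA (cs : List Char) (isL isR : Char → Bool) (st : List Nat × List Nat) (i : Nat) : List Nat × List Nat :=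
  let s := cs.getD i ' '
  if isL s then (st.1, i :: st.2)
  else if isR s then
    match st.2 with
    | top :: rest => if isL (cs.getD top ' ') then (st.1 ++ [top, i], rest) else (st.1, i :: st.2)
    | [] => (st.1, i :: st.2)
  else st

def nestedRemoval (text : String) (leftPattern : String) (rightPattern : String) : String :=
  let cs := text.toList
  let isL := nrIsPat leftPattern
  let isR := nrIsPat rightPattern
  let removed := ((List.range cs.length).foldl (nrStepA cs isL isR) ([], [])).1
  let ans := (List.range cs.length).foldl
    (fun ans i => if removed.contains i then ans else ans ++ [cs.getD i ' ']) ([] : List Char)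
  String.ofList ans

-- ===== PORT B =====
-- forward pass: count open lefts; a right seen while the count is positive is
-- dropped (flag false)
def nrFwd (isL isR : Char → Bool) (st : Nat × List Bool) (c : Char) : Nat × List Bool :=
  if isL c then (st.1 + 1, st.2 ++ [true])
  else if isR c && decide (0 < st.1) then (st.1 - 1, st.2 ++ [false])
  else (st.1, st.2 ++ [true])

-- backward pass (over the reversed text): count open rights; a left seen while
-- the count is positive is dropped (flag false)
def nrBwd (isL isR : Char → Bool) (st : Nat × List Bool) (c : Char) : Nat × List Bool :=
  if isL c then
    if 0 < st.1 then (st.1 - 1, st.2 ++ [false]) else (st.1, st.2 ++ [true])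
  else if isR c then (st.1 + 1, st.2 ++ [true])
  else (st.1, st.2 ++ [true])

def nestedRemoval_alt (text : String) (leftPattern : String) (rightPattern : String) : String :=
  let cs := text.toList
  let isL := nrIsPat leftPattern
  let isR := nrIsPat rightPattern
  let keepFwd := (cs.foldl (nrFwd isL isR) (0, [])).2
  let keepBwd := ((cs.reverse.foldl (nrBwd isL isR) (0, [])).2).reverse
  String.ofList (((cs.zip (keepFwd.zip keepBwd)).filter (fun p => p.2.1 && p.2.2)).map (fun p => p.1))

-- ===== PRECONDITION & SPEC =====
def Spec_nestedRemoval (text : String) (leftPattern : String) (rightPattern : String) (out : String) : Prop := out = nestedRemoval_alt text leftPattern rightPattern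
instance (text : String) (leftPattern : String) (rightPattern : String) (out : String) : Decidable (Spec_nestedRemoval text leftPattern rightPattern out) := by unfold Spec_nestedRemoval; infer_instance

-- ===== CLAIM (what is proved, stated in full; the proofs are below) =====
def Claim_equal_nestedRemoval : Prop := ∀ (text : String) (leftPattern : String) (rightPattern : String), Dom_nestedRemoval text leftPattern rightPattern → Spec_nestedRemoval text leftPattern rightPattern (nestedRemoval text leftPattern rightPattern)

-- ===== LEMMAS AND PROOFS =====

-- char at index j (indices used below are always < cs.length)
def nrGd (cs : List Char) (j : Nat) : Char := cs.getD j ' '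

-- forward open-left counter (saturating decrement, as both Pythons behave)
def nrOpnStep (isL isR : Char → Bool) (n : Nat) (c : Char) : Nat :=
  if isL c then n + 1 else if isR c then n - 1 else n

def nrOpn (isL isR : Char → Bool) (u : List Char) : Nat := u.foldl (nrOpnStep isL isR) 0

-- backward scan of u represented as the pair (a, b):
-- b = open rights of u (backward counter), a = lefts of u kept by the backward scan
def nrBsStep (isL isR : Char → Bool) (c : Char) (p : Nat × Nat) : Nat × Nat :=
  if isL c then (if 0 < p.2 then (p.1, p.2 - 1) else (p.1 + 1, p.2))
  else if isR c then (p.1, p.2 + 1) else p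

def nrBs (isL isR : Char → Bool) (u : List Char) : Nat × Nat := u.foldr (nrBsStep isL isR) (0, 0)

-- (a,b) represents the truncated-affine map n ↦ max (n-a) 0 + b; composition:
def nrComp (p q : Nat × Nat) : Nat × Nat :=
  if p.1 ≤ q.2 then (q.1, q.2 - p.1 + p.2) else (q.1 + p.1 - q.2, p.2)

theorem nrBsStep_comp (isL isR : Char → Bool) (c : Char) (p q : Nat × Nat) :
    nrBsStep isL isR c (nrComp p q) = nrComp (nrBsStep isL isR c p) q := by
  obtain ⟨a, b⟩ := p
  obtain ⟨x, y⟩ := q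
  simp only [nrBsStep, nrComp]
  split_ifs <;> (try simp_all) <;> omega

theorem nrBs_foldr (isL isR : Char → Bool) (u : List Char) (q : Nat × Nat) :
    u.foldr (nrBsStep isL isR) q = nrComp (nrBs isL isR u) q := by
  induction u with
  | nil => simp [nrBs, nrComp]
  | cons c u ih =>
    simp only [List.foldr_cons, ih, nrBs, nrBsStep_comp]

theorem nrBs_snoc_L (isL isR : Char → Bool) (u : List Char) (c : Char) (h : isL c = true) :
    nrBs isL isR (u ++ [c]) = ((nrBs isL isR u).1 + 1, (nrBs isL isR u).2) := by
  have : nrBs isL isR (u ++ [c]) = nrComp (nrBs isL isR u) (nrBsStep isL isR c (0, 0)) := by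
    show (u ++ [c]).foldr (nrBsStep isL isR) (0, 0) = _
    rw [List.foldr_append]
    simp only [List.foldr_cons, List.foldr_nil]
    exact nrBs_foldr isL isR u _
  rw [this]
  obtain ⟨a, b⟩ := nrBs isL isR u
  simp only [nrBsStep, nrComp, h]
  split_ifs <;> simp_all <;> omega

theorem nrBs_snoc_R (isL isR : Char → Bool) (u : List Char) (c : Char)
    (h1 : isL c = false) (h2 : isR c = true) :
    nrBs isL isR (u ++ [c]) =
      (if (nrBs isL isR u).1 = 0 then (0, (nrBs isL isR u).2 + 1)
       else ((nrBs isL isR u).1 - 1, (nrBs isL isR u).2)) := by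
  have : nrBs isL isR (u ++ [c]) = nrComp (nrBs isL isR u) (nrBsStep isL isR c (0, 0)) := by
    show (u ++ [c]).foldr (nrBsStep isL isR) (0, 0) = _
    rw [List.foldr_append]
    simp only [List.foldr_cons, List.foldr_nil]
    exact nrBs_foldr isL isR u _
  rw [this]
  obtain ⟨a, b⟩ := nrBs isL isR u
  simp only [nrBsStep, nrComp, h1, h2]
  split_ifs <;> simp_all <;> omega

theorem nrBs_snoc_O (isL isR : Char → Bool) (u : List Char) (c : Char)
    (h1 : isL c = false) (h2 : isR c = false) :
    nrBs isL isR (u ++ [c]) = nrBs isL isR u := by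
  have : nrBs isL isR (u ++ [c]) = nrComp (nrBs isL isR u) (nrBsStep isL isR c (0, 0)) := by
    show (u ++ [c]).foldr (nrBsStep isL isR) (0, 0) = _
    rw [List.foldr_append]
    simp only [List.foldr_cons, List.foldr_nil]
    exact nrBs_foldr isL isR u _
  rw [this]
  obtain ⟨a, b⟩ := nrBs isL isR u
  simp only [nrBsStep, nrComp, h1, h2]
  split_ifs <;> simp_all

-- the b-component never decreases when a character is appended
theorem nrBs_snoc_b_le (isL isR : Char → Bool) (u : List Char) (c : Char) :
    (nrBs isL isR u).2 ≤ (nrBs isL isR (u ++ [c])).2 := by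
  by_cases h1 : isL c = true
  · rw [nrBs_snoc_L isL isR u c h1]
  · by_cases h2 : isR c = true
    · rw [nrBs_snoc_R isL isR u c (by simpa using h1) h2]
      split_ifs <;> omega
    · rw [nrBs_snoc_O isL isR u c (by simpa using h1) (by simpa using h2)]

-- segment cs[j..k) of the text
def nrSfx (cs : List Char) (k j : Nat) : List Char := (cs.take k).drop j

theorem nrSfx_succ (cs : List Char) (k j : Nat) (hj : j ≤ k) (hk : k < cs.length) :
    nrSfx cs (k + 1) j = nrSfx cs k j ++ [nrGd cs k] := by
  unfold nrSfx nrGd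
  rw [List.take_add_one, List.getElem?_eq_getElem hk]
  rw [List.drop_append_of_le_length (by simp; omega)]
  simp [List.getD_eq_getElem?_getD, List.getElem?_eq_getElem hk]

theorem nrSfx_self (cs : List Char) (k : Nat) : nrSfx cs k k = [] := by
  unfold nrSfx
  apply List.drop_eq_nil_of_le
  simp

theorem nrOpn_take_succ (isL isR : Char → Bool) (cs : List Char) (k : Nat) (hk : k < cs.length) :
    nrOpn isL isR (cs.take (k + 1)) = nrOpnStep isL isR (nrOpn isL isR (cs.take k)) (nrGd cs k) := by
  unfold nrOpn nrGd
  rw [List.take_add_one, List.getElem?_eq_getElem hk, List.foldl_append]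
  simp [List.getD_eq_getElem?_getD, List.getElem?_eq_getElem hk]

-- index j is removed by A (closed form): a left with an open right after it
-- (within the first k characters), or a right with an open left before it
def nrRemP (isL isR : Char → Bool) (cs : List Char) (k j : Nat) : Prop :=
  j < k ∧ ((isL (nrGd cs j) = true ∧ 0 < (nrBs isL isR (nrSfx cs k (j + 1))).2) ∨
           (isL (nrGd cs j) = false ∧ isR (nrGd cs j) = true ∧ 0 < nrOpn isL isR (cs.take j)))

-- invariant of A's loop after the first k characters:
-- temp = unmatched lefts (most recent first, the i-th having exactly i kept
-- lefts after it and no open right after it) followed by unmatched rights;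
-- removed_list holds exactly the indices satisfying nrRemP.
def nrInv (isL isR : Char → Bool) (cs : List Char) (k : Nat) (st : List Nat × List Nat) : Prop :=
  ∃ L R : List Nat,
    st.2 = L ++ R ∧
    (∀ i j, L[i]? = some j → j < k ∧ isL (nrGd cs j) = true ∧
        nrBs isL isR (nrSfx cs k (j + 1)) = (i, 0)) ∧
    (∀ j, j < k → isL (nrGd cs j) = true → (nrBs isL isR (nrSfx cs k (j + 1))).2 = 0 → j ∈ L) ∧
    (∀ r ∈ R, r < k ∧ isL (nrGd cs r) = false ∧ isR (nrGd cs r) = true) ∧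
    (∀ j, j ∈ st.1 ↔ nrRemP isL isR cs k j) ∧
    nrOpn isL isR (cs.take k) = L.length

theorem nrInv_step (isL isR : Char → Bool) (cs : List Char) (k : Nat) (hk : k < cs.length)
    (st : List Nat × List Nat) (h : nrInv isL isR cs k st) :
    nrInv isL isR cs (k + 1) (nrStepA cs isL isR st k) := by
  obtain ⟨rem, temp⟩ := st
  obtain ⟨L, R, hTemp, hPos, hCompl, hR, hRem, hOpn⟩ := h
  dsimp only at hTemp hOpn hRem
  subst hTemp
  have hgd : ∀ t : Nat, (cs[t]?).getD ' ' = nrGd cs t := fun _ => rfl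
  have hsfx : ∀ j, j < k → nrSfx cs (k + 1) (j + 1) = nrSfx cs k (j + 1) ++ [nrGd cs k] :=
    fun j hj => nrSfx_succ cs k (j + 1) (by omega) hk
  have hself : nrSfx cs (k + 1) (k + 1) = [] := nrSfx_self cs (k + 1)
  have hopn' : nrOpn isL isR (cs.take (k + 1)) =
      nrOpnStep isL isR (nrOpn isL isR (cs.take k)) (nrGd cs k) := nrOpn_take_succ isL isR cs k hk
  by_cases h1 : isL (nrGd cs k) = true
  · -- left delimiter: pushed on the stack
    have hstep : nrStepA cs isL isR (rem, L ++ R) k = (rem, k :: (L ++ R)) := by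
      simp [nrStepA, hgd, h1]
    rw [hstep]
    refine ⟨k :: L, R, rfl, ?_, ?_, ?_, ?_, ?_⟩
    · intro i j hij
      cases i with
      | zero =>
        have hj : k = j := by simpa using hij
        subst hj
        exact ⟨Nat.lt_succ_self k, h1, by rw [hself]; rfl⟩
      | succ i =>
        have hij' : L[i]? = some j := by simpa using hij
        obtain ⟨hjk, hjL, hjbs⟩ := hPos i j hij'
        refine ⟨Nat.lt_succ_of_lt hjk, hjL, ?_⟩
        rw [hsfx j hjk, nrBs_snoc_L isL isR _ _ h1, hjbs]
    · intro j hj hL hb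
      by_cases hje : j = k
      · rw [hje]
        exact List.mem_cons_self
      · have hj' : j < k := by omega
        rw [hsfx j hj', nrBs_snoc_L isL isR _ _ h1] at hb
        exact List.mem_cons_of_mem _ (hCompl j hj' hL hb)
    · intro r hr
      obtain ⟨h3, h4, h5⟩ := hR r hr
      exact ⟨Nat.lt_succ_of_lt h3, h4, h5⟩
    · intro j
      rw [hRem j]
      unfold nrRemP
      constructor
      · rintro ⟨hjk, hd⟩
        refine ⟨by omega, ?_⟩
        rcases hd with ⟨ha, hb⟩ | hrt
        · exact Or.inl ⟨ha, by rw [hsfx j hjk, nrBs_snoc_L isL isR _ _ h1]; exact hb⟩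
        · exact Or.inr hrt
      · rintro ⟨hjk, hd⟩
        by_cases hje : j = k
        · exfalso
          rcases hd with ⟨_, hb⟩ | ⟨ha, _⟩
          · rw [hje, hself] at hb
            simp [nrBs] at hb
          · rw [hje, h1] at ha
            simp at ha
        · have hj' : j < k := by omega
          refine ⟨hj', ?_⟩
          rcases hd with ⟨ha, hb⟩ | hrt
          · rw [hsfx j hj', nrBs_snoc_L isL isR _ _ h1] at hb
            exact Or.inl ⟨ha, hb⟩
          · exact Or.inr hrt
    · rw [hopn', nrOpnStep, if_pos h1, hOpn]
      rfl
  · have h1' : isL (nrGd cs k) = false := by simpa using h1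
    by_cases h2 : isR (nrGd cs k) = true
    · -- right delimiter
      cases L with
      | cons j₁ L' =>
        obtain ⟨hj₁k, hj₁L, hj₁bs⟩ := hPos 0 j₁ (by simp)
        have hstep : nrStepA cs isL isR (rem, (j₁ :: L') ++ R) k = (rem ++ [j₁, k], L' ++ R) := by
          simp [nrStepA, hgd, h1', h2, hj₁L]
        rw [hstep]
        refine ⟨L', R, rfl, ?_, ?_, ?_, ?_, ?_⟩
        · intro i j hij
          have hij' : (j₁ :: L')[i + 1]? = some j := by simpa using hij
          obtain ⟨hjk, hjL, hjbs⟩ := hPos (i + 1) j hij'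
          refine ⟨Nat.lt_succ_of_lt hjk, hjL, ?_⟩
          rw [hsfx j hjk, nrBs_snoc_R isL isR _ _ h1' h2, hjbs]
          simp
        · intro j hj hL hb
          by_cases hje : j = k
          · rw [hje, h1'] at hL
            simp at hL
          · have hj' : j < k := by omega
            rw [hsfx j hj'] at hb
            have hble := nrBs_snoc_b_le isL isR (nrSfx cs k (j + 1)) (nrGd cs k)
            have hb0 : (nrBs isL isR (nrSfx cs k (j + 1))).2 = 0 := by omega
            have hmem := hCompl j hj' hL hb0
            rcases List.mem_cons.mp hmem with rfl | hmem'
            · exfalso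
              rw [nrBs_snoc_R isL isR _ _ h1' h2, hj₁bs] at hb
              simp at hb
            · exact hmem'
        · intro r hr
          obtain ⟨h3, h4, h5⟩ := hR r hr
          exact ⟨Nat.lt_succ_of_lt h3, h4, h5⟩
        · intro j
          constructor
          · intro hmem
            rcases List.mem_append.mp hmem with hmem' | hmem'
            · obtain ⟨hjk, hd⟩ := (hRem j).mp hmem'
              refine ⟨by omega, ?_⟩
              rcases hd with ⟨ha, hb⟩ | hrt
              · refine Or.inl ⟨ha, ?_⟩
                rw [hsfx j hjk]
                have := nrBs_snoc_b_le isL isR (nrSfx cs k (j + 1)) (nrGd cs k)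
                omega
              · exact Or.inr hrt
            · rcases List.mem_cons.mp hmem' with rfl | hmem''
              · refine ⟨Nat.lt_succ_of_lt hj₁k, Or.inl ⟨hj₁L, ?_⟩⟩
                rw [hsfx j hj₁k, nrBs_snoc_R isL isR _ _ h1' h2, hj₁bs]
                simp
              · have hjeq : j = k := by simpa using hmem''
                refine ⟨by omega, Or.inr ?_⟩
                rw [hjeq]
                refine ⟨h1', h2, ?_⟩
                rw [hOpn]
                simp
          · rintro ⟨hjk, hd⟩
            by_cases hje : j = k
            · rw [hje]
              exact List.mem_append.mpr (Or.inr (by simp))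
            · have hj' : j < k := by omega
              rcases hd with ⟨ha, hb⟩ | hrt
              · rw [hsfx j hj', nrBs_snoc_R isL isR _ _ h1' h2] at hb
                by_cases hbold : 0 < (nrBs isL isR (nrSfx cs k (j + 1))).2
                · exact List.mem_append.mpr (Or.inl ((hRem j).mpr ⟨hj', Or.inl ⟨ha, hbold⟩⟩))
                · have hb0 : (nrBs isL isR (nrSfx cs k (j + 1))).2 = 0 := by omega
                  have hmem := hCompl j hj' ha hb0
                  rcases List.mem_cons.mp hmem with rfl | hmem'
                  · exact List.mem_append.mpr (Or.inr (List.mem_cons_self))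
                  · exfalso
                    obtain ⟨i, hi⟩ := List.mem_iff_getElem?.mp hmem'
                    obtain ⟨_, _, hjbs⟩ := hPos (i + 1) j (by simpa using hi)
                    rw [hjbs] at hb
                    simp at hb
              · exact List.mem_append.mpr (Or.inl ((hRem j).mpr ⟨hj', Or.inr hrt⟩))
        · rw [hopn', nrOpnStep, if_neg (by simp [h1']), if_pos h2, hOpn]
          simp
      | nil =>
        have hstep : nrStepA cs isL isR (rem, [] ++ R) k = (rem, k :: R) := by
          cases R with
          | nil => simp [nrStepA, hgd, h1', h2]
          | cons r R' =>
            obtain ⟨_, hrL, _⟩ := hR r List.mem_cons_self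
            simp [nrStepA, hgd, h1', h2, hrL]
        rw [hstep]
        have hallb : ∀ j, j < k → isL (nrGd cs j) = true →
            0 < (nrBs isL isR (nrSfx cs k (j + 1))).2 := by
          intro j hj hL
          by_contra hb
          have hb0 : (nrBs isL isR (nrSfx cs k (j + 1))).2 = 0 := by omega
          exact absurd (hCompl j hj hL hb0) (List.not_mem_nil)
        refine ⟨[], k :: R, rfl, ?_, ?_, ?_, ?_, ?_⟩
        · intro i j hij
          simp at hij
        · intro j hj hL hb
          exfalso
          by_cases hje : j = k
          · rw [hje, h1'] at hL
            simp at hL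
          · have hj' : j < k := by omega
            rw [hsfx j hj'] at hb
            have hble := nrBs_snoc_b_le isL isR (nrSfx cs k (j + 1)) (nrGd cs k)
            exact absurd (hallb j hj' hL) (by omega)
        · intro r hr
          rcases List.mem_cons.mp hr with hre | hr'
          · rw [hre]
            exact ⟨Nat.lt_succ_self k, h1', h2⟩
          · obtain ⟨h3, h4, h5⟩ := hR r hr'
            exact ⟨Nat.lt_succ_of_lt h3, h4, h5⟩
        · intro j
          rw [hRem j]
          unfold nrRemP
          constructor
          · rintro ⟨hjk, hd⟩
            refine ⟨by omega, ?_⟩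
            rcases hd with ⟨ha, hb⟩ | hrt
            · refine Or.inl ⟨ha, ?_⟩
              rw [hsfx j hjk]
              have := nrBs_snoc_b_le isL isR (nrSfx cs k (j + 1)) (nrGd cs k)
              omega
            · exact Or.inr hrt
          · rintro ⟨hjk, hd⟩
            by_cases hje : j = k
            · exfalso
              rcases hd with ⟨ha, _⟩ | ⟨_, _, hop⟩
              · rw [hje, h1'] at ha
                simp at ha
              · rw [hje, hOpn] at hop
                simp at hop
            · have hj' : j < k := by omega
              refine ⟨hj', ?_⟩
              rcases hd with ⟨ha, hb⟩ | hrt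
              · exact Or.inl ⟨ha, hallb j hj' ha⟩
              · exact Or.inr hrt
        · rw [hopn', nrOpnStep, if_neg (by simp [h1']), if_pos h2, hOpn]
          rfl
    · -- ordinary character: state unchanged
      have h2' : isR (nrGd cs k) = false := by simpa using h2
      have hstep : nrStepA cs isL isR (rem, L ++ R) k = (rem, L ++ R) := by
        simp [nrStepA, hgd, h1', h2']
      rw [hstep]
      refine ⟨L, R, rfl, ?_, ?_, ?_, ?_, ?_⟩
      · intro i j hij
        obtain ⟨hjk, hjL, hjbs⟩ := hPos i j hij
        refine ⟨Nat.lt_succ_of_lt hjk, hjL, ?_⟩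
        rw [hsfx j hjk, nrBs_snoc_O isL isR _ _ h1' h2', hjbs]
      · intro j hj hL hb
        by_cases hje : j = k
        · rw [hje, h1'] at hL
          simp at hL
        · have hj' : j < k := by omega
          rw [hsfx j hj', nrBs_snoc_O isL isR _ _ h1' h2'] at hb
          exact hCompl j hj' hL hb
      · intro r hr
        obtain ⟨h3, h4, h5⟩ := hR r hr
        exact ⟨Nat.lt_succ_of_lt h3, h4, h5⟩
      · intro j
        rw [hRem j]
        unfold nrRemP
        constructor
        · rintro ⟨hjk, hd⟩
          refine ⟨by omega, ?_⟩
          rcases hd with ⟨ha, hb⟩ | hrt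
          · exact Or.inl ⟨ha, by rw [hsfx j hjk, nrBs_snoc_O isL isR _ _ h1' h2']; exact hb⟩
          · exact Or.inr hrt
        · rintro ⟨hjk, hd⟩
          by_cases hje : j = k
          · exfalso
            rcases hd with ⟨ha, _⟩ | ⟨_, hb, _⟩
            · rw [hje, h1'] at ha
              simp at ha
            · rw [hje, h2'] at hb
              simp at hb
          · have hj' : j < k := by omega
            refine ⟨hj', ?_⟩
            rcases hd with ⟨ha, hb⟩ | hrt
            · rw [hsfx j hj', nrBs_snoc_O isL isR _ _ h1' h2'] at hb
              exact Or.inl ⟨ha, hb⟩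
            · exact Or.inr hrt
      · rw [hopn', nrOpnStep, if_neg (by simp [h1']), if_neg (by simp [h2']), hOpn]

theorem nrInv_chain (isL isR : Char → Bool) (cs : List Char) :
    ∀ (m k : Nat) (st : List Nat × List Nat), k + m ≤ cs.length → nrInv isL isR cs k st →
    nrInv isL isR cs (k + m) ((List.range' k m).foldl (nrStepA cs isL isR) st) := by
  intro m
  induction m with
  | zero => intro k st _ h; simpa using h
  | succ n ih =>
    intro k st hle h
    have h1 := nrInv_step isL isR cs k (by omega) st h
    have := ih (k + 1) _ (by omega) h1
    simpa [List.range'_succ, Nat.add_comm, Nat.add_assoc, Nat.add_left_comm] using this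

-- keep-flags of B's two passes, closed form
def nrFFlag (isL isR : Char → Bool) (cs : List Char) (j : Nat) : Bool :=
  if isL (nrGd cs j) then true
  else if isR (nrGd cs j) && decide (0 < nrOpn isL isR (cs.take j)) then false
  else true

def nrBFlag (isL isR : Char → Bool) (cs : List Char) (j : Nat) : Bool :=
  if isL (nrGd cs j) then (if 0 < (nrBs isL isR (cs.drop (j + 1))).2 then false else true)
  else true

theorem nrGd_snoc_self (u : List Char) (c : Char) : nrGd (u ++ [c]) u.length = c := by
  simp [nrGd, List.getD_eq_getElem?_getD]

theorem nrGd_snoc_lt (u : List Char) (c : Char) (j : Nat) (hj : j < u.length) :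
    nrGd (u ++ [c]) j = nrGd u j := by
  simp [nrGd, List.getD_eq_getElem?_getD, List.getElem?_append_left hj]

theorem nrOpn_snoc (isL isR : Char → Bool) (u : List Char) (c : Char) :
    nrOpn isL isR (u ++ [c]) = nrOpnStep isL isR (nrOpn isL isR u) c := by
  simp [nrOpn, List.foldl_append]

theorem nrFFlag_snoc_lt (isL isR : Char → Bool) (u : List Char) (c : Char) (j : Nat)
    (hj : j < u.length) : nrFFlag isL isR (u ++ [c]) j = nrFFlag isL isR u j := by
  unfold nrFFlag
  rw [nrGd_snoc_lt u c j hj, List.take_append_of_le_length (Nat.le_of_lt hj)]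

theorem nrFFlag_snoc_self (isL isR : Char → Bool) (u : List Char) (c : Char) :
    nrFFlag isL isR (u ++ [c]) u.length =
      (if isL c then true else if isR c && decide (0 < nrOpn isL isR u) then false else true) := by
  unfold nrFFlag
  rw [nrGd_snoc_self, List.take_append_of_le_length le_rfl, List.take_length]

theorem nrFwd_char (isL isR : Char → Bool) (u : List Char) :
    u.foldl (nrFwd isL isR) (0, []) =
      (nrOpn isL isR u, (List.range u.length).map (fun j => nrFFlag isL isR u j)) := by
  induction u using List.reverseRecOn with
  | nil => simp [nrOpn]
  | append_singleton u c ih =>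
    rw [List.foldl_append, ih]
    have hlen : (u ++ [c]).length = u.length + 1 := by simp
    rw [hlen, List.range_succ, List.map_append]
    have hmap : (List.range u.length).map (fun j => nrFFlag isL isR (u ++ [c]) j)
        = (List.range u.length).map (fun j => nrFFlag isL isR u j) :=
      List.map_congr_left (fun j hj => nrFFlag_snoc_lt isL isR u c j (List.mem_range.mp hj))
    rw [hmap, nrOpn_snoc, List.map_singleton, nrFFlag_snoc_self]
    unfold nrFwd nrOpnStep
    by_cases h1 : isL c = true
    · simp [h1]
    · by_cases h2 : isR c = true
      · by_cases h3 : 0 < nrOpn isL isR u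
        · simp [h1, h2, h3]
        · have h0 : nrOpn isL isR u = 0 := by omega
          simp [h1, h2, h0]
      · simp [h1, h2]

theorem nrBFlag_shift (isL isR : Char → Bool) (c : Char) (u : List Char) (j : Nat) :
    nrBFlag isL isR (c :: u) (j + 1) = nrBFlag isL isR u j := by
  unfold nrBFlag
  simp only [nrGd, List.getD_cons_succ, List.drop_succ_cons]
  rfl

theorem nrBFlag_zero (isL isR : Char → Bool) (c : Char) (u : List Char) :
    nrBFlag isL isR (c :: u) 0 =
      (if isL c then (if 0 < (nrBs isL isR u).2 then false else true) else true) := by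
  unfold nrBFlag
  simp [nrGd]

theorem nrBwd_char (isL isR : Char → Bool) (u : List Char) :
    u.reverse.foldl (nrBwd isL isR) (0, []) =
      ((nrBs isL isR u).2,
       (List.range u.length).map (fun t => nrBFlag isL isR u (u.length - 1 - t))) := by
  induction u with
  | nil => simp [nrBs]
  | cons c u ih =>
    have hrev : (c :: u).reverse = u.reverse ++ [c] := by simp
    rw [hrev, List.foldl_append, ih]
    have hbs : nrBs isL isR (c :: u) = nrBsStep isL isR c (nrBs isL isR u) := rfl
    have hlen : (c :: u).length = u.length + 1 := rfl
    rw [hlen, hbs, List.range_succ, List.map_append]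
    have hmap : (List.range u.length).map (fun t => nrBFlag isL isR (c :: u) (u.length + 1 - 1 - t))
        = (List.range u.length).map (fun t => nrBFlag isL isR u (u.length - 1 - t)) := by
      apply List.map_congr_left
      intro t ht
      have htl := List.mem_range.mp ht
      have h1 : u.length + 1 - 1 - t = (u.length - 1 - t) + 1 := by omega
      rw [h1, nrBFlag_shift]
    rw [hmap, List.map_singleton]
    have hz : u.length + 1 - 1 - u.length = 0 := by omega
    rw [hz, nrBFlag_zero]
    unfold nrBwd nrBsStep
    by_cases h1 : isL c = true
    · by_cases h3 : 0 < (nrBs isL isR u).2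
      · simp [h1, h3]
      · simp [h1, h3]
    · by_cases h2 : isR c = true
      · simp [h1, h2]
      · simp [h1, h2]

theorem nrInv_base (isL isR : Char → Bool) (cs : List Char) :
    nrInv isL isR cs 0 ([], []) := by
  refine ⟨[], [], rfl, ?_, ?_, ?_, ?_, ?_⟩
  · intro i j hij
    simp at hij
  · intro j hj
    omega
  · intro r hr
    simp at hr
  · intro j
    simp [nrRemP]
  · simp [nrOpn]

theorem nr_foldl_filter (cs : List Char) (removed : List Nat) :
    ∀ (l : List Nat) (acc : List Char),
    l.foldl (fun ans i => if removed.contains i then ans else ans ++ [cs.getD i ' ']) acc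
      = acc ++ l.filterMap (fun i => if removed.contains i then none else some (cs.getD i ' ')) := by
  intro l
  induction l with
  | nil => simp
  | cons x xs ih =>
    intro acc
    cases h : removed.contains x with
    | true =>
      rw [List.foldl_cons, if_pos h, List.filterMap_cons_none (by rw [if_pos h]), ih]
    | false =>
      rw [List.foldl_cons, if_neg (by rw [h]; simp),
        List.filterMap_cons_some (by rw [if_neg (by rw [h]; simp)]), ih]
      simp

theorem nr_filterMap_if {α : Type} (l : List Nat) (p : Nat → Bool) (f : Nat → α) :
    l.filterMap (fun i => if p i = true then none else some (f i))
      = (l.filter (fun i => !p i)).map f := by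
  induction l with
  | nil => rfl
  | cons x xs ih =>
    cases h : p x with
    | true => simp [h, ih]
    | false => simp [h, ih]

theorem nr_rev_map_range {α : Type} (n : Nat) (f : Nat → α) :
    ((List.range n).map (fun t => f (n - 1 - t))).reverse = (List.range n).map f := by
  apply List.ext_getElem
  · simp
  · intro i h1 h2
    simp only [List.length_reverse, List.length_map, List.length_range] at h1 h2
    rw [List.getElem_reverse]
    simp only [List.getElem_map, List.getElem_range, List.length_map, List.length_range]
    congr 1
    omega

theorem nr_zip_map (cs : List Char) (fF fB : Nat → Bool) :
    cs.zip (((List.range cs.length).map fF).zip ((List.range cs.length).map fB))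
      = (List.range cs.length).map (fun j => (cs.getD j ' ', (fF j, fB j))) := by
  apply List.ext_getElem
  · simp
  · intro i h1 h2
    simp only [List.length_zip, List.length_map, List.length_range, Nat.min_self,
      List.length_range, Nat.min_self] at h1 h2
    simp only [List.getElem_zip, List.getElem_map, List.getElem_range]
    have : i < cs.length := by omega
    rw [List.getD_eq_getElem?_getD, List.getElem?_eq_getElem this]
    rfl

theorem nr_flag_char (isL isR : Char → Bool) (cs : List Char) (removed : List Nat)
    (hRem : ∀ j, j ∈ removed ↔ nrRemP isL isR cs cs.length j) (j : Nat) (hj : j < cs.length) :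
    (!removed.contains j) = (nrFFlag isL isR cs j && nrBFlag isL isR cs j) := by
  have hsfxn : nrSfx cs cs.length (j + 1) = cs.drop (j + 1) := by
    unfold nrSfx
    rw [List.take_length]
  have hiff : removed.contains j = true ↔ nrRemP isL isR cs cs.length j := by
    rw [List.contains_iff_mem]
    exact hRem j
  by_cases h1 : isL (nrGd cs j) = true
  · have hf : nrFFlag isL isR cs j = true := by
      unfold nrFFlag
      rw [if_pos h1]
    by_cases hb : 0 < (nrBs isL isR (cs.drop (j + 1))).2
    · have hbf : nrBFlag isL isR cs j = false := by
        unfold nrBFlag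
        rw [if_pos h1, if_pos hb]
      have hct : removed.contains j = true :=
        hiff.mpr ⟨hj, Or.inl ⟨h1, by rw [hsfxn]; exact hb⟩⟩
      rw [hf, hbf, hct]
      rfl
    · have hbf : nrBFlag isL isR cs j = true := by
        unfold nrBFlag
        rw [if_pos h1, if_neg hb]
      have hct : removed.contains j = false := by
        rw [Bool.eq_false_iff]
        intro hc
        rcases (hiff.mp hc).2 with ⟨_, hb'⟩ | ⟨ha, _⟩
        · rw [hsfxn] at hb'
          exact hb hb'
        · rw [h1] at ha
          simp at ha
      rw [hf, hbf, hct]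
      rfl
  · have h1' : isL (nrGd cs j) = false := by simpa using h1
    have hbf : nrBFlag isL isR cs j = true := by
      unfold nrBFlag
      rw [if_neg h1]
    by_cases h2 : isR (nrGd cs j) = true
    · by_cases h3 : 0 < nrOpn isL isR (cs.take j)
      · have hf : nrFFlag isL isR cs j = false := by
          unfold nrFFlag
          rw [if_neg h1, if_pos (by simp [h2, h3])]
        have hct : removed.contains j = true := hiff.mpr ⟨hj, Or.inr ⟨h1', h2, h3⟩⟩
        rw [hf, hbf, hct]
        rfl
      · have hf : nrFFlag isL isR cs j = true := by
          unfold nrFFlag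
          rw [if_neg h1, if_neg (by simp [h3])]
        have hct : removed.contains j = false := by
          rw [Bool.eq_false_iff]
          intro hc
          rcases (hiff.mp hc).2 with ⟨ha, _⟩ | ⟨_, _, hop⟩
          · rw [h1'] at ha
            simp at ha
          · exact h3 hop
        rw [hf, hbf, hct]
        rfl
    · have hf : nrFFlag isL isR cs j = true := by
        unfold nrFFlag
        rw [if_neg h1, if_neg (by simp [h2])]
      have hct : removed.contains j = false := by
        rw [Bool.eq_false_iff]
        intro hc
        rcases (hiff.mp hc).2 with ⟨ha, _⟩ | ⟨_, hb', _⟩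
        · rw [h1'] at ha
          simp at ha
        · rw [hb'] at h2
          simp at h2
      rw [hf, hbf, hct]
      rfl

theorem nr_equiv (text leftPattern rightPattern : String) :
    nestedRemoval text leftPattern rightPattern = nestedRemoval_alt text leftPattern rightPattern := by
  simp only [nestedRemoval, nestedRemoval_alt]
  generalize text.toList = cs
  generalize nrIsPat leftPattern = isL
  generalize nrIsPat rightPattern = isR
  -- the invariant at the end of A's first loop
  have hchain := nrInv_chain isL isR cs cs.length 0 ([], []) (by omega) (nrInv_base isL isR cs)
  rw [← List.range_eq_range'] at hchain
  simp only [Nat.zero_add] at hchain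
  obtain ⟨L, R, _, _, _, _, hRem, _⟩ := hchain
  -- A's output as a filter of the index range
  rw [nr_foldl_filter cs _ (List.range cs.length) [], nr_filterMap_if, List.nil_append]
  -- B's two passes in closed form
  rw [nrFwd_char isL isR cs, nrBwd_char isL isR cs]
  simp only
  rw [nr_rev_map_range cs.length (fun j => nrBFlag isL isR cs j), nr_zip_map, List.filter_map,
    List.map_map]
  have hfilter : (List.range cs.length).filter (fun i => !(((List.range cs.length).foldl (nrStepA cs isL isR) ([], [])).1).contains i)
      = (List.range cs.length).filter
          ((fun p => p.2.1 && p.2.2) ∘ (fun j => (cs.getD j ' ', (nrFFlag isL isR cs j, nrBFlag isL isR cs j)))) := by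
    apply List.filter_congr
    intro j hjr
    exact nr_flag_char isL isR cs _ hRem j (List.mem_range.mp hjr)
  rw [hfilter]
  rfl

-- ===== VERDICT (by name: the statement is the Claim_ definition above) =====
theorem nestedRemoval_spec : Claim_equal_nestedRemoval := by
  intro text l r _
  unfold Spec_nestedRemoval
  exact nr_equiv text l r
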